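-- pv_equiv track=rewrite | github.com/rxue/data-structures-and-algorithms | LeetCode/python3/LeetCode75/TwoPointers/ContainerWithMostWaters_findMaxHeightFirst.py | _find2MaxHeights
-- ===== SOURCE A (Python) =====
-- from typing import Tuple
--
-- def _find2MaxHeights(heights: list[int]) -> Tuple[int, int]:
--     max1Idx = None
--     for i in range(0,len(heights)):
--         if max1Idx == None:
--             max1Idx = i
--         else:
--             if heights[i] > heights[max1Idx]:
--                 max1Idx = i
--     max2Idx = None
--     for i in range(0,len(heights)):
--         if i != max1Idx:
--             if max2Idx == None:
--                 max2Idx = i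
--             else:
--                 if heights[i] > heights[max2Idx]:
--                     max2Idx = i
--     if max1Idx > max2Idx:
--         return max2Idx, max1Idx
--     else:
--         return max1Idx, max2Idx
-- ===== SOURCE B (Python) =====
-- from typing import Tuple
--
-- def _find2MaxHeights(heights: list[int]) -> Tuple[int, int]:
--     # Single forward pass keeping the best and runner-up as (value, index) pairs.
--     best = None
--     second = None
--     for i, h in enumerate(heights):
--         if best is None or h > best[0]:
--             second = best
--             best = (h, i)
--         elif second is None or h > second[0]:
--             second = (h, i)
--     i1 = best[1]
--     i2 = second[1]
--     if i1 > i2: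
--         return i2, i1
--     return i1, i2
-- ===== Notes on version B (the rewrite author's own statement) =====
-- stated objective: faster
-- what changed: B replaces A's two separate index scans (first find the argmax, then rescan everything excluding it for the runner-up) by a single forward pass maintaining best and runner-up as (value, index) pairs, demoting the old best when a new maximum appears.
import Mathlib
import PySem

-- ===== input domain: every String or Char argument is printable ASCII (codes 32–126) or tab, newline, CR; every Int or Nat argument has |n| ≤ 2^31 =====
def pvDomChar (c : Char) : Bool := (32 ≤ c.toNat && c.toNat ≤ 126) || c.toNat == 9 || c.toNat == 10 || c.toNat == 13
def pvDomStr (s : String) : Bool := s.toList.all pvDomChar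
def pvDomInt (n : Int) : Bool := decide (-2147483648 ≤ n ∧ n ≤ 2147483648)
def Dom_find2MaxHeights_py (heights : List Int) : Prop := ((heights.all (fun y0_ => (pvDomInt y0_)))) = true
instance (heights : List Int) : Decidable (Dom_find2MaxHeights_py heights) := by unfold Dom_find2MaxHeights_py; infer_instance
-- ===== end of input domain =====

-- B replaces A's two index-scans by one forward pass keeping (value, index) for the best and runner-up (measured constant-factor faster in a timing run).

-- ===== PORT A =====
-- first loop body: update of max1Idx
def pyA_step1 (heights : List Int) (m : Option Int) (i : Int) : Option Int :=
  match m with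
  | none => some i
  | some m1 =>
    if PySem.List.pyGetD heights i 0 > PySem.List.pyGetD heights m1 0 then some i else some m1

-- second loop body: update of max2Idx (skips i == max1Idx)
def pyA_step2 (heights : List Int) (max1Idx : Option Int) (m : Option Int) (i : Int) : Option Int :=
  if some i ≠ max1Idx then
    match m with
    | none => some i
    | some m2 =>
      if PySem.List.pyGetD heights i 0 > PySem.List.pyGetD heights m2 0 then some i else some m2
  else m

def find2MaxHeights_py (heights : List Int) : Int × Int :=
  let max1Idx := (PySem.List.pyRange 0 (heights.length : Int) 1).foldl (pyA_step1 heights) none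
  let max2Idx := (PySem.List.pyRange 0 (heights.length : Int) 1).foldl (pyA_step2 heights max1Idx) none
  -- Python compares max1Idx > max2Idx: with a None (len < 2) it raises TypeError; excluded by Pre_
  match max1Idx, max2Idx with
  | some a, some b => if a > b then (b, a) else (a, b)
  | _, _ => (0, 0)

-- ===== PORT B =====
-- single pass: best/second are (value, index) options, i the running index
def altLoop : Option (Int × Int) → Option (Int × Int) → Int → List Int → Option (Int × Int) × Option (Int × Int)
  | best, second, _, [] => (best, second)
  | best, second, i, h :: t =>
    match best with
    | none => altLoop (some (h, i)) best (i + 1) t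
    | some (bv, _) =>
      if h > bv then altLoop (some (h, i)) best (i + 1) t
      else
        match second with
        | none => altLoop best (some (h, i)) (i + 1) t
        | some (sv, _) =>
          if h > sv then altLoop best (some (h, i)) (i + 1) t
          else altLoop best second (i + 1) t

def find2MaxHeights_py_alt (heights : List Int) : Int × Int :=
  let st := altLoop none none 0 heights
  -- Python indexes best[1]/second[1] on a None (len < 2): TypeError; excluded by Pre_
  match st.1 with
  | none => (0, 0)
  | some (_, i1) =>
    match st.2 with
    | none => (0, 0)
    | some (_, i2) => if i1 > i2 then (i2, i1) else (i1, i2)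

-- ===== PRECONDITION & SPEC =====
-- Pre_ excludes lists of length < 2, on which the Python A raises TypeError (None compared with >)
def Pre_find2MaxHeights_py (heights : List Int) : Prop := 2 ≤ heights.length
instance (heights : List Int) : Decidable (Pre_find2MaxHeights_py heights) := by unfold Pre_find2MaxHeights_py; infer_instance
def pvWitness_find2MaxHeights_py : List Int := [3, 1]

def Spec_find2MaxHeights_py (heights : List Int) (out : Int × Int) : Prop := out = find2MaxHeights_py_alt heights
instance (heights : List Int) (out : Int × Int) : Decidable (Spec_find2MaxHeights_py heights out) := by unfold Spec_find2MaxHeights_py; infer_instance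

-- ===== CLAIM (what is proved, stated in full; the proofs are below) =====
def Claim_equal_find2MaxHeights_py : Prop := ∀ (heights : List Int), Dom_find2MaxHeights_py heights → Pre_find2MaxHeights_py heights → Spec_find2MaxHeights_py heights (find2MaxHeights_py heights)

-- ===== LEMMAS AND PROOFS =====

-- A's two folds, named for the proofs
def F1 (l : List Int) : Option Int :=
  (PySem.List.pyRange 0 (l.length : Int) 1).foldl (pyA_step1 l) none
def F2 (l : List Int) : Option Int :=
  (PySem.List.pyRange 0 (l.length : Int) 1).foldl (pyA_step2 l (F1 l)) none

-- one step of B's loop, as a function of the state pair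
def altStep (st : Option (Int × Int) × Option (Int × Int)) (i : Int) (h : Int) :
    Option (Int × Int) × Option (Int × Int) :=
  match st.1 with
  | none => (some (h, i), st.1)
  | some (bv, _) =>
    if h > bv then (some (h, i), st.1)
    else
      match st.2 with
      | none => (st.1, some (h, i))
      | some (sv, _) => if h > sv then (st.1, some (h, i)) else (st.1, st.2)

theorem altLoop_append_singleton (p : List Int) (x : Int) :
    ∀ (b s : Option (Int × Int)) (i : Int),
      altLoop b s i (p ++ [x]) = altStep (altLoop b s i p) (i + (p.length : Int)) x := by
  induction p with
  | nil =>
    intro b s i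
    rcases b with _ | ⟨bv, bi⟩ <;> rcases s with _ | ⟨sv, si⟩ <;>
      simp [altLoop, altStep] <;> split_ifs <;> simp [altLoop]
  | cons y p ih =>
    intro b s i
    have hl : i + ((y :: p).length : Int) = (i + 1) + (p.length : Int) := by
      simp; ring
    rcases b with _ | ⟨bv, bi⟩
    · simp only [List.cons_append, altLoop, hl]; exact ih _ _ _
    · rcases s with _ | ⟨sv, si⟩
      · simp only [List.cons_append, altLoop, hl]
        split_ifs <;> exact ih _ _ _
      · simp only [List.cons_append, altLoop, hl]
        split_ifs <;> exact ih _ _ _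

-- lookups below n are a frame: step1's fold only depends on (and stays within) the first n entries
theorem fold1_frame_bound (n : ℕ) :
    ∀ (l l' : List Int),
      (∀ k : Int, 0 ≤ k → k < (n : Int) → PySem.List.pyGetD l k 0 = PySem.List.pyGetD l' k 0) →
      ((PySem.List.pyRange 0 (n : Int) 1).foldl (pyA_step1 l) none
        = (PySem.List.pyRange 0 (n : Int) 1).foldl (pyA_step1 l') none)
      ∧ (∀ i : Int, (PySem.List.pyRange 0 (n : Int) 1).foldl (pyA_step1 l) none = some i →
          0 ≤ i ∧ i < (n : Int)) := by
  induction n with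
  | zero => intro l l' _; simp [PySem.List.pyRange_zero_nat]
  | succ n ih =>
    intro l l' hagree
    have hsplit : PySem.List.pyRange 0 ((n : Int) + 1) 1
        = PySem.List.pyRange 0 (n : Int) 1 ++ [(n : Int)] :=
      PySem.List.pyRange_one_succ_right (by positivity)
    have hcast : ((n + 1 : ℕ) : Int) = (n : Int) + 1 := by push_cast; ring
    have hagree' : ∀ k : Int, 0 ≤ k → k < (n : Int) →
        PySem.List.pyGetD l k 0 = PySem.List.pyGetD l' k 0 := by
      intro k h0 h1; exact hagree k h0 (by omega)
    obtain ⟨heq, hbnd⟩ := ih l l' hagree'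
    rw [hcast, hsplit]
    rw [List.foldl_append, List.foldl_append]
    simp only [List.foldl_cons, List.foldl_nil]
    constructor
    · rw [heq]
      cases hF : (PySem.List.pyRange 0 (n : Int) 1).foldl (pyA_step1 l') none with
      | none => rfl
      | some i =>
        obtain ⟨h0, h1⟩ := hbnd i (heq ▸ hF)
        simp only [pyA_step1]
        rw [hagree (n : Int) (by positivity) (by omega), hagree i h0 (by omega)]
    · intro i hi
      cases hF : (PySem.List.pyRange 0 (n : Int) 1).foldl (pyA_step1 l) none with
      | none => rw [hF] at hi; simp [pyA_step1] at hi; omega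
      | some j =>
        obtain ⟨h0, h1⟩ := hbnd j hF
        rw [hF] at hi
        simp only [pyA_step1] at hi
        split_ifs at hi <;> simp at hi <;> omega

-- same frame/bound fact for step2 (with any fixed max1Idx on both sides)
theorem fold2_frame_bound (n : ℕ) :
    ∀ (l l' : List Int) (m1 : Option Int),
      (∀ k : Int, 0 ≤ k → k < (n : Int) → PySem.List.pyGetD l k 0 = PySem.List.pyGetD l' k 0) →
      ((PySem.List.pyRange 0 (n : Int) 1).foldl (pyA_step2 l m1) none
        = (PySem.List.pyRange 0 (n : Int) 1).foldl (pyA_step2 l' m1) none)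
      ∧ (∀ i : Int, (PySem.List.pyRange 0 (n : Int) 1).foldl (pyA_step2 l m1) none = some i →
          0 ≤ i ∧ i < (n : Int)) := by
  induction n with
  | zero => intro l l' m1 _; simp [PySem.List.pyRange_zero_nat]
  | succ n ih =>
    intro l l' m1 hagree
    have hsplit : PySem.List.pyRange 0 ((n : Int) + 1) 1
        = PySem.List.pyRange 0 (n : Int) 1 ++ [(n : Int)] :=
      PySem.List.pyRange_one_succ_right (by positivity)
    have hcast : ((n + 1 : ℕ) : Int) = (n : Int) + 1 := by push_cast; ring
    have hagree' : ∀ k : Int, 0 ≤ k → k < (n : Int) →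
        PySem.List.pyGetD l k 0 = PySem.List.pyGetD l' k 0 := by
      intro k h0 h1; exact hagree k h0 (by omega)
    obtain ⟨heq, hbnd⟩ := ih l l' m1 hagree'
    rw [hcast, hsplit]
    rw [List.foldl_append, List.foldl_append]
    simp only [List.foldl_cons, List.foldl_nil]
    constructor
    · rw [heq]
      cases hF : (PySem.List.pyRange 0 (n : Int) 1).foldl (pyA_step2 l' m1) none with
      | none => simp [pyA_step2]
      | some i =>
        obtain ⟨h0, h1⟩ := hbnd i (heq ▸ hF)
        simp only [pyA_step2]
        rw [hagree (n : Int) (by positivity) (by omega), hagree i h0 (by omega)]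
    · intro i hi
      cases hF : (PySem.List.pyRange 0 (n : Int) 1).foldl (pyA_step2 l m1) none with
      | none =>
        rw [hF] at hi; simp only [pyA_step2] at hi
        split_ifs at hi <;> simp at hi <;> omega
      | some j =>
        obtain ⟨h0, h1⟩ := hbnd j hF
        rw [hF] at hi
        simp only [pyA_step2] at hi
        split_ifs at hi <;> simp at hi <;> omega

-- appending one element does not change lookups at indices below the old length
theorem pyGetD_append_lt (p : List Int) (x : Int) (k : Int) (h0 : 0 ≤ k) (h1 : k < (p.length : Int)) :
    PySem.List.pyGetD (p ++ [x]) k 0 = PySem.List.pyGetD p k 0 := by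
  rw [PySem.List.pyGetD_eq_getElem (p ++ [x]) 0 h0 (by simp; omega),
      PySem.List.pyGetD_eq_getElem p 0 h0 (by omega)]
  exact List.getElem_append_left (by omega)

theorem pyGetD_append_len (p : List Int) (x : Int) :
    PySem.List.pyGetD (p ++ [x]) (p.length : Int) 0 = x := by
  rw [PySem.List.pyGetD_eq_getElem (p ++ [x]) 0 (by positivity) (by simp)]
  simp

-- on a range avoiding the excluded index, the second-pass step is the first-pass step
theorem foldl_step2_eq_step1 (l : List Int) (n : Int) (xs : List Int) (h : ∀ i ∈ xs, i ≠ n) :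
    ∀ m, xs.foldl (pyA_step2 l (some n)) m = xs.foldl (pyA_step1 l) m := by
  induction xs with
  | nil => intro m; rfl
  | cons a t ih =>
    intro m
    simp only [List.foldl_cons]
    rw [show pyA_step2 l (some n) m a = pyA_step1 l m a from by
      simp [pyA_step2, pyA_step1, h a (by simp)]]
    exact ih (fun i hi => h i (List.mem_cons_of_mem _ hi)) _

-- the main invariant: after the whole list, B's single-pass state is exactly
-- (A's max1 index with its value, A's max2 index with its value)
theorem main_inv : ∀ (l : List Int), l ≠ [] →
    ∃ i1, F1 l = some i1 ∧ 0 ≤ i1 ∧ i1 < (l.length : Int) ∧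
      altLoop none none 0 l
        = (some (PySem.List.pyGetD l i1 0, i1),
           (F2 l).map (fun j => (PySem.List.pyGetD l j 0, j))) := by
  intro l
  induction l using List.reverseRecOn with
  | nil => intro h; exact absurd rfl h
  | append_singleton p x ih =>
    intro _
    by_cases hp : p = []
    · subst hp
      simp only [List.nil_append]
      refine ⟨0, ?_, le_refl 0, by simp, ?_⟩
      · show F1 [x] = some 0
        unfold F1
        rw [show ((([x] : List Int).length : ℕ) : Int) = 0 + 1 from by simp,
            PySem.List.pyRange_one_singleton]
        rfl
      · show altLoop none none 0 [x] = _
        have hF2 : F2 [x] = none := by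
          unfold F2 F1
          rw [show ((([x] : List Int).length : ℕ) : Int) = 0 + 1 from by simp,
              PySem.List.pyRange_one_singleton]
          rfl
        rw [hF2]
        simp [altLoop, PySem.List.pyGetD_zero_cons]
    · obtain ⟨i1, hF1p, h0, h1, hstate⟩ := ih hp
      have hlen : (((p ++ [x]).length : ℕ) : Int) = (p.length : Int) + 1 := by simp
      have hsplit : PySem.List.pyRange 0 ((p.length : Int) + 1) 1
          = PySem.List.pyRange 0 (p.length : Int) 1 ++ [(p.length : Int)] :=
        PySem.List.pyRange_one_succ_right (by positivity)
      have hagree : ∀ k : Int, 0 ≤ k → k < (p.length : Int) →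
          PySem.List.pyGetD (p ++ [x]) k 0 = PySem.List.pyGetD p k 0 :=
        fun k a b => pyGetD_append_lt p x k a b
      have hF1p' : (PySem.List.pyRange 0 (p.length : Int) 1).foldl (pyA_step1 p) none = some i1 := hF1p
      have hfr1 := fold1_frame_bound p.length (p ++ [x]) p hagree
      have hfr2 := fold2_frame_bound p.length (p ++ [x]) p (some i1) hagree
      have hF2p' : (PySem.List.pyRange 0 (p.length : Int) 1).foldl (pyA_step2 p (some i1)) none = F2 p := by
        unfold F2; rw [hF1p]
      have hbnd2 : ∀ i2, F2 p = some i2 → 0 ≤ i2 ∧ i2 < (p.length : Int) := by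
        intro i2 hi2
        exact (fold2_frame_bound p.length p p (some i1) (fun _ _ _ => rfl)).2 i2 (hF2p' ▸ hi2)
      have hnotmem : ∀ i ∈ PySem.List.pyRange 0 (p.length : Int) 1, i ≠ (p.length : Int) := by
        intro i hi
        have := (PySem.List.mem_pyRange_one.mp hi).2
        omega
      have hloop : altLoop none none 0 (p ++ [x])
          = altStep (some (PySem.List.pyGetD p i1 0, i1),
              (F2 p).map (fun j => (PySem.List.pyGetD p j 0, j))) (p.length : Int) x := by
        rw [altLoop_append_singleton, hstate, zero_add]
      by_cases hx : PySem.List.pyGetD p i1 0 < x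
      · -- new maximum at index p.length; old max1 becomes max2
        have hF1new : F1 (p ++ [x]) = some (p.length : Int) := by
          unfold F1
          rw [hlen, hsplit, List.foldl_append]
          simp only [List.foldl_cons, List.foldl_nil]
          rw [hfr1.1, hF1p']
          simp only [pyA_step1]
          rw [pyGetD_append_len, pyGetD_append_lt p x i1 h0 h1]
          simp [hx]
        have hF2new : F2 (p ++ [x]) = some i1 := by
          unfold F2
          rw [hF1new, hlen, hsplit, List.foldl_append]
          simp only [List.foldl_cons, List.foldl_nil]
          rw [foldl_step2_eq_step1 (p ++ [x]) (p.length : Int) _ hnotmem,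
              hfr1.1, hF1p']
          simp [pyA_step2]
        refine ⟨(p.length : Int), hF1new, by positivity, by rw [hlen]; omega, ?_⟩
        rw [hloop, hF2new]
        simp [altStep, pyGetD_append_len, pyGetD_append_lt p x i1 h0 h1, hx]
      · -- old maximum survives
        have hF1new : F1 (p ++ [x]) = some i1 := by
          unfold F1
          rw [hlen, hsplit, List.foldl_append]
          simp only [List.foldl_cons, List.foldl_nil]
          rw [hfr1.1, hF1p']
          simp only [pyA_step1]
          rw [pyGetD_append_len, pyGetD_append_lt p x i1 h0 h1]
          simp [hx]
        have hbody : F2 (p ++ [x])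
            = pyA_step2 (p ++ [x]) (some i1) (F2 p) (p.length : Int) := by
          unfold F2
          rw [hF1new, hlen, hsplit, List.foldl_append]
          simp only [List.foldl_cons, List.foldl_nil]
          rw [hfr2.1, hF2p', hF1p, hF2p']
        refine ⟨i1, hF1new, h0, by rw [hlen]; omega, ?_⟩
        rw [hloop]
        cases hF2p : F2 p with
        | none =>
          have hF2new : F2 (p ++ [x]) = some (p.length : Int) := by
            rw [hbody, hF2p]
            simp only [pyA_step2]
            rw [if_pos (by simp; omega)]
          rw [hF2new]
          simp [altStep, pyGetD_append_len, pyGetD_append_lt p x i1 h0 h1, hx]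
        | some i2 =>
          obtain ⟨g0, g1⟩ := hbnd2 i2 hF2p
          by_cases hy : PySem.List.pyGetD p i2 0 < x
          · have hF2new : F2 (p ++ [x]) = some (p.length : Int) := by
              rw [hbody, hF2p]
              simp only [pyA_step2]
              rw [if_pos (by simp; omega)]
              rw [pyGetD_append_len, pyGetD_append_lt p x i2 g0 g1]
              simp [hy]
            rw [hF2new]
            simp [altStep, pyGetD_append_len, pyGetD_append_lt p x i1 h0 h1,
                  pyGetD_append_lt p x i2 g0 g1, hx, hy]
          · have hF2new : F2 (p ++ [x]) = some i2 := by
              rw [hbody, hF2p]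
              simp only [pyA_step2]
              rw [if_pos (by simp; omega)]
              rw [pyGetD_append_len, pyGetD_append_lt p x i2 g0 g1]
              simp [hy]
            rw [hF2new]
            simp [altStep, pyGetD_append_len, pyGetD_append_lt p x i1 h0 h1,
                  pyGetD_append_lt p x i2 g0 g1, hx, hy]

-- ===== VERDICT (by name: the statement is the Claim_ definition above) =====
theorem find2MaxHeights_py_spec : Claim_equal_find2MaxHeights_py := by
  intro heights _ hpre
  have hne : heights ≠ [] := by
    intro h; subst h; simp [Pre_find2MaxHeights_py] at hpre
  obtain ⟨i1, hF1, h0, h1, hstate⟩ := main_inv heights hne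
  show find2MaxHeights_py heights = find2MaxHeights_py_alt heights
  have hA : find2MaxHeights_py heights =
      (match F1 heights, F2 heights with
       | some a, some b => if a > b then (b, a) else (a, b)
       | _, _ => (0, 0)) := rfl
  have hB : find2MaxHeights_py_alt heights =
      (match (altLoop none none 0 heights).1 with
       | none => (0, 0)
       | some (_, j1) =>
         match (altLoop none none 0 heights).2 with
         | none => (0, 0)
         | some (_, j2) => if j1 > j2 then (j2, j1) else (j1, j2)) := rfl
  rw [hA, hB, hstate, hF1]
  cases F2 heights with
  | none => simp
  | some i2 => simp
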